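-- pv_equiv track=rewrite | github.com/kx5f3759df/rfmon | rfmon.py | clusters_from_mask
-- ===== SOURCE A (Python) =====
-- def clusters_from_mask(mask):
--     """Return list of (start_idx, end_idx) inclusive for contiguous True segments."""
--     clusters = []
--     n = len(mask)
--     i = 0
--     while i < n:
--         if mask[i]:
--             j = i
--             while j + 1 < n and mask[j + 1]:
--                 j += 1
--             clusters.append((i, j))
--             i = j + 1
--         else:
--             i += 1
--     return clusters
-- ===== SOURCE B (Python) =====
-- def clusters_from_mask(mask):
--     """Return list of (start_idx, end_idx) inclusive for contiguous True segments."""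
--     clusters = []
--     n = len(mask)
--     start = None
--     for i in range(n):
--         if mask[i]:
--             if start is None:
--                 start = i
--         else:
--             if start is not None:
--                 clusters.append((start, i - 1))
--                 start = None
--     if start is not None:
--         clusters.append((start, n - 1))
--     return clusters
-- ===== Notes on version B (the rewrite author's own statement) =====
-- stated objective: idiomatic
-- what changed: Replaced the nested while-loops (outer scan plus inner forward run scan with index jumping) by a single linear pass that keeps the current run's start and closes a run on each True-to-False edge and once after the loop.
import Mathlib
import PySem

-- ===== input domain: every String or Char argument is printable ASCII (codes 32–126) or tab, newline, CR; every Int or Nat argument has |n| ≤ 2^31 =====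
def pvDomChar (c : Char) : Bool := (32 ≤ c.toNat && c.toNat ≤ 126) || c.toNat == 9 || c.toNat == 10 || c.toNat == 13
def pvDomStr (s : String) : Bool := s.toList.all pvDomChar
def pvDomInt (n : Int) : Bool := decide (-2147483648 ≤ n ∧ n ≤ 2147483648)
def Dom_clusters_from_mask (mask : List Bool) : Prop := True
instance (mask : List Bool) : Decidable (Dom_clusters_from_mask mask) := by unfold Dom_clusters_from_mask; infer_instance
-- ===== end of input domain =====

-- B replaces A's nested scans by a single edge-detection pass keeping the current run's start (idiomatic decomposition; same O(n) cost).

-- ===== PORT A =====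
-- inner 'while j + 1 < n and mask[j + 1]: j += 1' (indexing always in range, so getD is exact)
def pvScanRun (mask : List Bool) (n j : Nat) : Nat :=
  if j + 1 < n ∧ mask.getD (j + 1) false then pvScanRun mask n (j + 1) else j
termination_by n - j

theorem pvScanRun_ge (mask : List Bool) (n j : Nat) : j ≤ pvScanRun mask n j := by
  unfold pvScanRun
  split
  · exact le_trans (Nat.le_succ j) (pvScanRun_ge mask n (j + 1))
  · exact le_refl j
termination_by n - j

-- outer while loop of A
def pvLoopA (mask : List Bool) (n i : Nat) (acc : List (Int × Int)) : List (Int × Int) :=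
  if i < n then
    if mask.getD i false then
      let j := pvScanRun mask n i
      pvLoopA mask n (j + 1) (acc ++ [((i : Int), (j : Int))])
    else
      pvLoopA mask n (i + 1) acc
  else acc
termination_by n - i
decreasing_by
  · have := pvScanRun_ge mask n i; omega
  · omega

def clusters_from_mask (mask : List Bool) : List (Int × Int) :=
  pvLoopA mask mask.length 0 []

-- ===== PORT B =====
-- single pass: rest = mask[i:], start = index of current open run (None if outside a run)
def pvLoopB (rest : List Bool) (i : Nat) (start : Option Nat) (acc : List (Int × Int)) : List (Int × Int) :=
  match rest with
  | [] =>
      match start with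
      | some s => acc ++ [((s : Int), (i : Int) - 1)]
      | none => acc
  | b :: t =>
      if b then
        pvLoopB t (i + 1) (match start with | none => some i | some s => some s) acc
      else
        match start with
        | some s => pvLoopB t (i + 1) none (acc ++ [((s : Int), (i : Int) - 1)])
        | none => pvLoopB t (i + 1) none acc

def clusters_from_mask_alt (mask : List Bool) : List (Int × Int) :=
  pvLoopB mask 0 none []

-- ===== PRECONDITION & SPEC =====
def Spec_clusters_from_mask (mask : List Bool) (out : List (Int × Int)) : Prop := out = clusters_from_mask_alt mask
instance (mask : List Bool) (out : List (Int × Int)) : Decidable (Spec_clusters_from_mask mask out) := by unfold Spec_clusters_from_mask; infer_instance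

-- ===== CLAIM (what is proved, stated in full; the proofs are below) =====
def Claim_equal_clusters_from_mask : Prop := ∀ (mask : List Bool), Dom_clusters_from_mask mask → Spec_clusters_from_mask mask (clusters_from_mask mask)

-- ===== LEMMAS AND PROOFS =====

-- While inside a run that started at s, B eventually closes it exactly where A's inner scan stops.
theorem pvLoopB_run (mask : List Bool) (n k : Nat) (s : Nat) (acc : List (Int × Int))
    (hn : n = mask.length) (hk : k < n) :
    pvLoopB (mask.drop (k + 1)) (k + 1) (some s) acc =
      pvLoopB (mask.drop (pvScanRun mask n k + 1)) (pvScanRun mask n k + 1) none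
        (acc ++ [((s : Int), (pvScanRun mask n k : Int))]) := by
  rw [pvScanRun]
  split
  · rename_i h
    obtain ⟨h1, h2⟩ := h
    have hdrop : mask.drop (k + 1) = mask[k + 1] :: mask.drop (k + 2) := by
      exact List.drop_eq_getElem_cons (by omega)
    have hget : mask.getD (k + 1) false = mask[k + 1] := List.getD_eq_getElem _ _ (by omega)
    rw [hdrop, pvLoopB]
    rw [hget] at h2
    simp only [h2, if_true]
    exact pvLoopB_run mask n (k + 1) s acc hn (by omega)
  · rename_i h
    by_cases hkn : k + 1 < n
    · have h2 : mask.getD (k + 1) false = false := by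
        by_contra hc
        exact h ⟨hkn, by simpa using hc⟩
      have hdrop : mask.drop (k + 1) = mask[k + 1] :: mask.drop (k + 2) := by
        exact List.drop_eq_getElem_cons (by omega)
      have hget : mask.getD (k + 1) false = mask[k + 1] := List.getD_eq_getElem _ _ (by omega)
      rw [hdrop, pvLoopB]
      rw [hget] at h2
      simp only [h2, Bool.false_eq_true, if_false]
      rw [pvLoopB]
      norm_num
    · have hk1 : k + 1 = n := by omega
      have hdrop : mask.drop (k + 1) = [] := by
        apply List.drop_eq_nil_of_le; omega
      rw [hdrop, pvLoopB, pvLoopB]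
      norm_num
termination_by n - k

theorem pvScanRun_lt (mask : List Bool) (n j : Nat) (hj : j < n) : pvScanRun mask n j < n := by
  rw [pvScanRun]
  split
  · rename_i h; exact pvScanRun_lt mask n (j + 1) h.1
  · exact hj
termination_by n - j

-- A's outer loop from a position outside any run agrees with B's pass over the remaining suffix.
theorem pvLoopA_eq_pvLoopB (mask : List Bool) (n i : Nat) (acc : List (Int × Int))
    (hn : n = mask.length) (hi : i ≤ n) :
    pvLoopA mask n i acc = pvLoopB (mask.drop i) i none acc := by
  rw [pvLoopA]
  by_cases h : i < n
  · simp only [h, if_true]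
    have hdrop : mask.drop i = mask[i] :: mask.drop (i + 1) := by
      exact List.drop_eq_getElem_cons (by omega)
    have hget : mask.getD i false = mask[i] := List.getD_eq_getElem _ _ (by omega)
    rw [hdrop, pvLoopB, ← hget]
    by_cases hb : mask.getD i false = true
    · simp only [hb, if_true]
      have hge := pvScanRun_ge mask n i
      have hlt : pvScanRun mask n i < n := pvScanRun_lt mask n i h
      rw [pvLoopB_run mask n i i acc hn h]
      exact pvLoopA_eq_pvLoopB mask n (pvScanRun mask n i + 1) _ hn (by omega)
    · simp only [hb]
      exact pvLoopA_eq_pvLoopB mask n (i + 1) acc hn (by omega)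
  · have hin : i = n := by omega
    simp only [h, if_false]
    have : mask.drop i = [] := List.drop_eq_nil_of_le (by omega)
    rw [this, pvLoopB]
termination_by n - i

-- ===== VERDICT (by name: the statement is the Claim_ definition above) =====
theorem clusters_from_mask_spec : Claim_equal_clusters_from_mask := by
  intro mask _
  unfold Spec_clusters_from_mask clusters_from_mask clusters_from_mask_alt
  rw [pvLoopA_eq_pvLoopB mask mask.length 0 [] rfl (Nat.zero_le _)]
  rfl
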